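-- pv_equiv track=rewrite | github.com/blzzua/codewars | 6-kyu/inserting_multiple_strings_into_another_string.py | insert_at_indexes
-- ===== SOURCE A (Python) =====
-- def insert_at_indexes(phrase, word, indexes):
--     _is_zero=False
--     if 0 in indexes:
--         indexes = indexes[1:]
--         _is_zero=True
--     phrase=phrase[::-1]
--     for i in indexes[::-1]:
--         phrase = phrase[:-i] + word[::-1] + phrase[-i:]
--     if _is_zero:
--         phrase = phrase + word[::-1]
--     return phrase[::-1]
-- ===== SOURCE B (Python) =====
-- def insert_at_indexes(phrase, word, indexes):
--     # piece table: keep the string as a list of segments; each insertion splits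
--     # one segment and adds a word segment; one final ''.join.
--     pieces = [phrase]
--     total = len(phrase)
--     for i in reversed(indexes):
--         pos = min(i, total) if i >= 0 else max(total + i, 0)
--         new = []
--         done = False
--         for p in pieces:
--             if not done and pos <= len(p):
--                 new.append(p[:pos])
--                 new.append(word)
--                 new.append(p[pos:])
--                 done = True
--             else:
--                 if not done:
--                     pos -= len(p)
--                 new.append(p)
--         pieces = new
--         total += len(word)
--     return ''.join(pieces)
-- ===== Notes on version B (the rewrite author's own statement) =====
-- stated objective: faster
-- what changed: B keeps the text as a piece table (a list of segments plus a running length) and splices the word into one segment per insertion with a single final ''.join, instead of A's per-insertion re-concatenation of two whole-string slices of a twice-reversed string; B also drops A's broken special-casing of index 0.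
-- intended difference: On lists containing 0 other than as a unique first element, A discards the first list element (whatever it is) and appends word at the end for each remaining 0; B treats every 0 uniformly as insertion position 0 (prepend), the intended meaning of index 0. — e.g. on insert_at_indexes("ab", "X", [0, 0]): A returns "XabX", B returns "XXab"
import Mathlib
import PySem

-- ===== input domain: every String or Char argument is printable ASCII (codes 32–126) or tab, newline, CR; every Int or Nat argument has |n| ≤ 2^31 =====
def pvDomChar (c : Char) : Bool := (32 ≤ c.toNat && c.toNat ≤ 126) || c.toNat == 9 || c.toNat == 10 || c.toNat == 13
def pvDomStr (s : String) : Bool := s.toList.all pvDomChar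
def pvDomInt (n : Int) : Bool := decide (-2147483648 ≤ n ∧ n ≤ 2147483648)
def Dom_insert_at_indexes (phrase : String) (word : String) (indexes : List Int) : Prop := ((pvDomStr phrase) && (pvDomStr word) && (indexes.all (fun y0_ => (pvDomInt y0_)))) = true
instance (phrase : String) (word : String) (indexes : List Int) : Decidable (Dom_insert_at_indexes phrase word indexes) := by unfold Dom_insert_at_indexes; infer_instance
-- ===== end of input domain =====

-- B replaces A's repeated whole-string re-concatenation by a piece table (a list of
-- segments and one final join); B also treats index 0 uniformly, see D_ below.

-- ===== PORT A =====
-- literal transliteration of A; strings handled on .toList (PySem.Chars convention);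
-- s[::-1] is List.reverse (exact per PySem.List.slice?_none_none_neg_one).
def insert_at_indexes (phrase : String) (word : String) (indexes : List Int) : String :=
  let isZero : Bool := decide ((0 : Int) ∈ indexes)              -- if 0 in indexes: _is_zero = True
  let idxs : List Int :=
    if isZero then PySem.List.slice indexes (some 1) none else indexes   -- indexes = indexes[1:]
  let p1 : List Char := phrase.toList.reverse                    -- phrase = phrase[::-1]
  let wr : List Char := word.toList.reverse                      -- word[::-1]
  let p2 : List Char := idxs.reverse.foldl                       -- for i in indexes[::-1]:
    (fun s i =>
      PySem.List.slice s none (some (-i)) ++ wr ++ PySem.List.slice s (some (-i)) none)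
    p1                                                           --   phrase = phrase[:-i] + word[::-1] + phrase[-i:]
  let p3 : List Char := if isZero then p2 ++ wr else p2          -- if _is_zero: phrase = phrase + word[::-1]
  String.ofList p3.reverse                                       -- return phrase[::-1]

-- ===== PORT B =====
-- literal transliteration of Source B: pieces : List (List Char), running total length;
-- each insertion splits one piece; one final ''.join.
def insert_at_indexes_alt (phrase : String) (word : String) (indexes : List Int) : String :=
  let w : List Char := word.toList
  let st :=
    indexes.reverse.foldl                                        -- for i in reversed(indexes):
      (fun (st : List (List Char) × Int) i =>
        let pos : Int := if 0 ≤ i then min i st.2 else max (st.2 + i) 0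
        let inner :=
          st.1.foldl                                             -- for p in pieces:
            (fun (acc : List (List Char) × Int × Bool) p =>
              if acc.2.2 = false ∧ acc.2.1 ≤ (p.length : Int) then
                (acc.1 ++ [PySem.List.slice p none (some acc.2.1), w,
                           PySem.List.slice p (some acc.2.1) none], acc.2.1, true)
              else
                (acc.1 ++ [p],
                 (if acc.2.2 then acc.2.1 else acc.2.1 - (p.length : Int)), acc.2.2))
            ([], pos, false)
        (inner.1, st.2 + (w.length : Int)))
      ([phrase.toList], (phrase.toList.length : Int))
  String.ofList (PySem.Chars.join [] st.1)                       -- return ''.join(pieces)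

-- ===== PRECONDITION & SPEC =====
-- On lists containing 0 other than as a unique first element, A discards the FIRST list
-- element (whatever it is) and appends word at the END for each remaining 0; B treats
-- every 0 uniformly as insertion position 0 (prepend), the intended meaning of index 0.
def D_insert_at_indexes (phrase : String) (word : String) (indexes : List Int) : Prop :=
  word ≠ "" ∧ (0 : Int) ∈ indexes ∧ (indexes.head? ≠ some 0 ∨ (0 : Int) ∈ indexes.tail)
instance (phrase : String) (word : String) (indexes : List Int) : Decidable (D_insert_at_indexes phrase word indexes) := by unfold D_insert_at_indexes; infer_instance

def Spec_insert_at_indexes (phrase : String) (word : String) (indexes : List Int) (out : String) : Prop := ¬ D_insert_at_indexes phrase word indexes → out = insert_at_indexes_alt phrase word indexes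
instance (phrase : String) (word : String) (indexes : List Int) (out : String) : Decidable (Spec_insert_at_indexes phrase word indexes out) := by unfold Spec_insert_at_indexes; infer_instance

def pvDiffWitness_insert_at_indexes : String × String × List Int := ("ab", "X", [0, 0])
def pvDiffWitnessOut_insert_at_indexes : String × String := ("XabX", "XXab")

-- ===== CLAIM (what is proved, stated in full; the proofs are below) =====
def Claim_unchanged_insert_at_indexes : Prop := ∀ (phrase : String) (word : String) (indexes : List Int), Dom_insert_at_indexes phrase word indexes → Spec_insert_at_indexes phrase word indexes (insert_at_indexes phrase word indexes)
def Claim_changed_insert_at_indexes : Prop := Dom_insert_at_indexes (pvDiffWitness_insert_at_indexes.1) (pvDiffWitness_insert_at_indexes.2.1) (pvDiffWitness_insert_at_indexes.2.2) ∧ D_insert_at_indexes (pvDiffWitness_insert_at_indexes.1) (pvDiffWitness_insert_at_indexes.2.1) (pvDiffWitness_insert_at_indexes.2.2) ∧ insert_at_indexes (pvDiffWitness_insert_at_indexes.1) (pvDiffWitness_insert_at_indexes.2.1) (pvDiffWitness_insert_at_indexes.2.2) = pvDiffWitnessOut_insert_at_indexes.1 ∧ insert_at_indexes_alt (pvDiffWitness_insert_at_indexes.1)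 (pvDiffWitness_insert_at_indexes.2.1) (pvDiffWitness_insert_at_indexes.2.2) = pvDiffWitnessOut_insert_at_indexes.2 ∧ pvDiffWitnessOut_insert_at_indexes.1 ≠ pvDiffWitnessOut_insert_at_indexes.2

-- ===== LEMMAS AND PROOFS =====

-- the common forward semantics: insert w at (clamped) position p of s
def pvIns (w s : List Char) (p : Nat) : List Char := s.take p ++ w ++ s.drop p
-- B's clamped position, as a Nat (Nat subtraction clamps exactly like max(·,0))
def pvPos (i : Int) (n : Nat) : Nat := if 0 ≤ i then min i.toNat n else n - (-i).toNat
-- the forward meaning of both loops: right-to-left sequential insertion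
def pvF (w : List Char) (L : List Int) (s : List Char) : List Char :=
  L.foldl (fun s i => pvIns w s (pvPos i s.length)) s

theorem pvIns_length (w s : List Char) (p : Nat) :
    (pvIns w s p).length = s.length + w.length := by
  simp [pvIns]; omega

-- A's loop body (on the reversed string) is pvIns, for every nonzero index
theorem pv_stepA (w s : List Char) (i : Int) (hi : i ≠ 0) :
    PySem.List.slice s.reverse none (some (-i)) ++ w.reverse ++
      PySem.List.slice s.reverse (some (-i)) none
    = (pvIns w s (pvPos i s.length)).reverse := by
  rcases lt_or_gt_of_ne hi with hneg | hpos
  · -- i < 0 : nonnegative slice bounds on the reversed string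
    have hb : (0 : Int) ≤ -i := by omega
    rw [PySem.List.slice_to _ hb, PySem.List.slice_from _ hb]
    simp only [pvIns, pvPos, if_neg (by omega : ¬ (0:Int) ≤ i), List.reverse_append,
      List.take_reverse, List.drop_reverse, List.append_assoc]
  · -- i > 0 : negative slice bounds
    have hk : 0 < i.toNat := by omega
    have hni : -i = -((i.toNat : Nat) : Int) := by omega
    rw [hni, PySem.List.slice_to_neg_natCast _ _ hk, PySem.List.slice_from_neg_natCast _ _ hk]
    simp only [pvIns, pvPos, if_pos (by omega : (0:Int) ≤ i), List.reverse_append,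
      List.take_reverse, List.drop_reverse, List.length_reverse, List.append_assoc]
    congr 2
    · congr 1; omega
    · congr 2; omega

-- A's whole loop computes pvF (reversed), when no processed index is 0
theorem pv_foldA (w : List Char) (L : List Int) (h : ∀ i ∈ L, i ≠ 0) :
    ∀ s : List Char,
      L.foldl (fun t i =>
        PySem.List.slice t none (some (-i)) ++ w.reverse ++ PySem.List.slice t (some (-i)) none)
        s.reverse
      = (pvF w L s).reverse := by
  induction L with
  | nil => intro s; simp [pvF]
  | cons a L ih =>
    intro s
    have ha : a ≠ 0 := h a (by simp)
    simp only [List.foldl_cons, pvF]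
    rw [pv_stepA w s a ha, ih (fun i hi => h i (by simp [hi]))]
    rfl

-- the two halves of any Int-point slice give back s (used for the word = "" case)
theorem pv_slice_split (s : List Char) (b : Int) :
    PySem.List.slice s none (some b) ++ PySem.List.slice s (some b) none = s := by
  simp only [PySem.List.slice]
  have h : List.take (s.length - PySem.List.clampIdx s.length b)
      (List.drop (PySem.List.clampIdx s.length b) s)
      = List.drop (PySem.List.clampIdx s.length b) s := List.take_of_length_le (by simp)
  rw [h]
  exact List.take_append_drop _ _

theorem pv_join_flatten (P : List (List Char)) : PySem.Chars.join [] P = P.flatten := by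
  induction P with
  | nil => rfl
  | cons a l ih =>
    cases l with
    | nil => simp [PySem.Chars.join, List.intercalate]
    | cons b m => rw [PySem.Chars.join_cons_cons]; simp_all

-- B's inner loop, started with done = false, splices w at position q of the flattening
theorem pv_inner (w : List Char) (P : List (List Char)) :
    ∀ (N : List (List Char)) (q : Int), P ≠ [] → 0 ≤ q → q ≤ (P.flatten.length : Int) →
      (P.foldl
        (fun (acc : List (List Char) × Int × Bool) p =>
          if acc.2.2 = false ∧ acc.2.1 ≤ (p.length : Int) then
            (acc.1 ++ [PySem.List.slice p none (some acc.2.1), w,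
                       PySem.List.slice p (some acc.2.1) none], acc.2.1, true)
          else
            (acc.1 ++ [p],
             (if acc.2.2 then acc.2.1 else acc.2.1 - (p.length : Int)), acc.2.2))
        (N, q, false)).1.flatten
      = N.flatten ++ pvIns w P.flatten q.toNat := by
  induction P with
  | nil => intro _ _ h; exact absurd rfl h
  | cons p P ih =>
    intro N q _ h0 hq
    simp only [List.foldl_cons]
    by_cases hle : q ≤ (p.length : Int)
    · -- the word lands in this piece; the rest of the loop runs with done = true
      rw [if_pos (by exact ⟨trivial, hle⟩)]
      have hdone : ∀ (M : List (List Char)) (r : Int) (Q : List (List Char)),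
          (Q.foldl
            (fun (acc : List (List Char) × Int × Bool) p =>
              if acc.2.2 = false ∧ acc.2.1 ≤ (p.length : Int) then
                (acc.1 ++ [PySem.List.slice p none (some acc.2.1), w,
                           PySem.List.slice p (some acc.2.1) none], acc.2.1, true)
              else
                (acc.1 ++ [p],
                 (if acc.2.2 then acc.2.1 else acc.2.1 - (p.length : Int)), acc.2.2))
            (M, r, true)) = (M ++ Q, r, true) := by
        intro M r Q
        induction Q generalizing M with
        | nil => simp
        | cons x Q ihQ => simp [ihQ]
      rw [hdone]
      rw [PySem.List.slice_to _ h0, PySem.List.slice_from _ h0]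
      have ht : (p ++ P.flatten).take q.toNat = p.take q.toNat :=
        List.take_append_of_le_length (by omega)
      have hd : (p ++ P.flatten).drop q.toNat = p.drop q.toNat ++ P.flatten :=
        List.drop_append_of_le_length (by omega)
      simp only [pvIns, List.flatten_cons, List.flatten_append, List.flatten_nil, ht, hd]
      simp
    · -- the word lands further right: recurse with q - len p
      rw [if_neg (by simp [hle])]
      have hP : P ≠ [] := by
        intro hnil; rw [hnil] at hq; simp at hq; omega
      have hstep : (if (false : Bool) = true then q else q - (p.length : Int))
          = q - (p.length : Int) := by simp
      rw [hstep, ih (N ++ [p]) (q - (p.length : Int)) hP (by omega)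
        (by simp at hq ⊢; omega)]
      have ht : (p ++ P.flatten).take q.toNat
          = p ++ P.flatten.take (q - (p.length:Int)).toNat := by
        rw [List.take_append]
        congr 2
        · exact List.take_of_length_le (by omega)
        · omega
      have hd : (p ++ P.flatten).drop q.toNat = P.flatten.drop (q - (p.length:Int)).toNat := by
        rw [List.drop_append, List.drop_of_length_le (by omega), List.nil_append]
        congr 1
        omega
      simp only [pvIns, List.flatten_cons, List.flatten_append, List.flatten_nil, ht, hd]
      simp

-- nonemptiness of the pieces list is preserved by the inner loop
theorem pv_inner_ne (w : List Char) (P : List (List Char)) :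
    ∀ (N : List (List Char)) (q : Int) (d : Bool), P ≠ [] →
      (P.foldl
        (fun (acc : List (List Char) × Int × Bool) p =>
          if acc.2.2 = false ∧ acc.2.1 ≤ (p.length : Int) then
            (acc.1 ++ [PySem.List.slice p none (some acc.2.1), w,
                       PySem.List.slice p (some acc.2.1) none], acc.2.1, true)
          else
            (acc.1 ++ [p],
             (if acc.2.2 then acc.2.1 else acc.2.1 - (p.length : Int)), acc.2.2))
        (N, q, d)).1 ≠ [] := by
  induction P with
  | nil => intro _ _ _ h; exact absurd rfl h
  | cons p P ih =>
    intro N q d _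
    by_cases hP : P = []
    · subst hP
      simp only [List.foldl_cons, List.foldl_nil]
      split <;> simp
    · simp only [List.foldl_cons]
      split <;> exact ih _ _ _ hP

-- B's outer loop computes pvF on the flattening, keeping the running length exact
theorem pv_foldB (w : List Char) (L : List Int) :
    ∀ (P : List (List Char)) (t : Int), P ≠ [] → t = (P.flatten.length : Int) →
      (L.foldl
        (fun (st : List (List Char) × Int) i =>
          ((st.1.foldl
            (fun (acc : List (List Char) × Int × Bool) p =>
              if acc.2.2 = false ∧ acc.2.1 ≤ (p.length : Int) then
                (acc.1 ++ [PySem.List.slice p none (some acc.2.1), w,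
                           PySem.List.slice p (some acc.2.1) none], acc.2.1, true)
              else
                (acc.1 ++ [p],
                 (if acc.2.2 then acc.2.1 else acc.2.1 - (p.length : Int)), acc.2.2))
            ([], (if 0 ≤ i then min i st.2 else max (st.2 + i) 0), false)).1,
           st.2 + (w.length : Int)))
        (P, t)).1.flatten = pvF w L P.flatten ∧
      (L.foldl
        (fun (st : List (List Char) × Int) i =>
          ((st.1.foldl
            (fun (acc : List (List Char) × Int × Bool) p =>
              if acc.2.2 = false ∧ acc.2.1 ≤ (p.length : Int) then
                (acc.1 ++ [PySem.List.slice p none (some acc.2.1), w,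
                           PySem.List.slice p (some acc.2.1) none], acc.2.1, true)
              else
                (acc.1 ++ [p],
                 (if acc.2.2 then acc.2.1 else acc.2.1 - (p.length : Int)), acc.2.2))
            ([], (if 0 ≤ i then min i st.2 else max (st.2 + i) 0), false)).1,
           st.2 + (w.length : Int)))
        (P, t)).1 ≠ [] ∧
      (L.foldl
        (fun (st : List (List Char) × Int) i =>
          ((st.1.foldl
            (fun (acc : List (List Char) × Int × Bool) p =>
              if acc.2.2 = false ∧ acc.2.1 ≤ (p.length : Int) then
                (acc.1 ++ [PySem.List.slice p none (some acc.2.1), w,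
                           PySem.List.slice p (some acc.2.1) none], acc.2.1, true)
              else
                (acc.1 ++ [p],
                 (if acc.2.2 then acc.2.1 else acc.2.1 - (p.length : Int)), acc.2.2))
            ([], (if 0 ≤ i then min i st.2 else max (st.2 + i) 0), false)).1,
           st.2 + (w.length : Int)))
        (P, t)).2 = ((pvF w L P.flatten).length : Int) := by
  induction L with
  | nil =>
    intro P t hP ht
    exact ⟨rfl, hP, ht⟩
  | cons i L ih =>
    intro P t hP ht
    have h0 : 0 ≤ (if 0 ≤ i then min i t else max (t + i) 0) := by split <;> omega
    have hle : (if 0 ≤ i then min i t else max (t + i) 0) ≤ (P.flatten.length : Int) := by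
      rw [← ht]; split <;> omega
    have hposN : (if 0 ≤ i then min i t else max (t + i) 0).toNat = pvPos i P.flatten.length := by
      rw [pvPos]; rcases le_or_gt 0 i with h | h
      · rw [if_pos h, if_pos h]; omega
      · rw [if_neg (by omega), if_neg (by omega)]; omega
    simp only [List.foldl_cons]
    have hflat := pv_inner w P ([]) _ hP h0 hle
    have hne := pv_inner_ne w P ([]) (if 0 ≤ i then min i t else max (t + i) 0) false hP
    simp only [List.flatten_nil, List.nil_append] at hflat
    have hih := ih _ (t + (w.length : Int)) hne
      (by rw [hflat, pvIns_length]; push_cast; omega)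
    rw [hflat, hposN] at hih
    rw [pvF, List.foldl_cons, ← pvF]
    exact hih

-- identity facts for the word = "" case
theorem pvF_nil (L : List Int) : ∀ s : List Char, pvF [] L s = s := by
  induction L with
  | nil => intro s; rfl
  | cons i L ih =>
    intro s
    rw [pvF, List.foldl_cons, ← pvF]
    have h : pvIns [] s (pvPos i s.length) = s := by simp [pvIns]
    rw [h, ih]

theorem pv_foldA_nilword (L : List Int) :
    ∀ s : List Char,
      L.foldl (fun t i =>
        PySem.List.slice t none (some (-i)) ++ ([] : List Char) ++
          PySem.List.slice t (some (-i)) none) s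
      = s := by
  induction L with
  | nil => intro s; rfl
  | cons i L ih =>
    intro s
    rw [List.foldl_cons]
    have h : PySem.List.slice s none (some (-i)) ++ ([] : List Char) ++
        PySem.List.slice s (some (-i)) none = s := by
      rw [List.append_nil]; exact pv_slice_split s (-i)
    rw [h, ih]

-- ===== VERDICT =====
theorem insert_at_indexes_spec : Claim_unchanged_insert_at_indexes := by
  intro phrase word indexes _ hD
  simp only [insert_at_indexes, insert_at_indexes_alt]
  by_cases hmem : (0 : Int) ∈ indexes
  · rcases Decidable.not_and_iff_not_or_not.mp (by
        intro hc
        exact hD ⟨hc.1, hmem, hc.2⟩ : ¬ (word ≠ "" ∧ (indexes.head? ≠ some 0 ∨ (0:Int) ∈ indexes.tail))) with hw | hc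
    · -- word = "": both sides return the phrase unchanged
      have hwl : word.toList = [] := by
        have : word = "" := by simpa using hw
        simp [this]
      simp only [hmem, decide_true, if_pos, hwl, List.reverse_nil]
      rw [pv_foldA_nilword]
      have hB := pv_foldB ([]) indexes.reverse ([phrase.toList]) ((phrase.toList.length : Int))
        (by simp) (by simp)
      rw [pv_join_flatten, hB.1, pvF_nil]
      simp
    · -- indexes = 0 :: rest with 0 ∉ rest
      rcases not_or.mp hc with ⟨hhead, htail⟩
      have hhead' : indexes.head? = some 0 := Decidable.not_not.mp hhead
      obtain ⟨rest, hrest⟩ : ∃ rest, indexes = 0 :: rest := by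
        cases indexes with
        | nil => simp at hhead'
        | cons a l => simp at hhead'; exact ⟨l, by simp [hhead']⟩
      subst hrest
      have h0rest : (0 : Int) ∉ rest := by simpa using htail
      simp only [hmem, decide_true, if_pos, PySem.List.slice_from_one, List.tail_cons,
        List.reverse_cons]
      -- A side
      rw [pv_foldA word.toList rest.reverse
        (fun i hi => by rintro rfl; exact h0rest (List.mem_reverse.mp hi)) phrase.toList]
      -- B side: split the fold at the final 0
      rw [List.foldl_append]
      have hB := pv_foldB word.toList rest.reverse ([phrase.toList])
        ((phrase.toList.length : Int)) (by simp) (by simp)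
      rw [List.foldl_cons, List.foldl_nil]
      obtain ⟨hf, hn, hl⟩ := hB
      simp only [List.flatten_cons, List.flatten_nil, List.append_nil] at hf hl
      rw [hl]
      rw [if_pos (le_refl (0:Int))]
      have hmin : min (0:Int) ((pvF word.toList rest.reverse phrase.toList).length : Int)
          = 0 := by omega
      rw [hmin]
      have hq := pv_inner word.toList _ ([]) 0 hn (le_refl (0:Int))
        (by rw [hf]; exact_mod_cast Int.natCast_nonneg _)
      rw [pv_join_flatten, hq, hf]
      simp [pvIns, List.reverse_append]
  · -- no zero anywhere: the two loops run over the same indexes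
    simp only [hmem, decide_false, Bool.false_eq_true, if_false]
    rw [pv_foldA word.toList indexes.reverse
      (fun i hi => by rintro rfl; exact hmem (List.mem_reverse.mp hi)) phrase.toList]
    have hB := pv_foldB word.toList indexes.reverse ([phrase.toList])
      ((phrase.toList.length : Int)) (by simp) (by simp)
    rw [pv_join_flatten, hB.1]
    simp

theorem insert_at_indexes_changed : Claim_changed_insert_at_indexes := by
  unfold Claim_changed_insert_at_indexes; decide
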